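-- pv_equiv track=rewrite | github.com/herbie-fp/herbie | old_scripts/countsubexprs.py | subExprs
-- ===== SOURCE A (Python) =====
-- import math
--
-- maxLength = math.inf
--
-- def subExprs(s):
--     ret = []
--     stack = []
--     for i, c in enumerate(s):
--         if c == '(':
--             if len(stack) < maxLength:
--                 stack.append(i)
--         elif c == ')':
--             if stack:
--                 start = stack.pop()
--                 subexpr = s[start:i+1]
--                 ret.append(subexpr)
--     return ret
-- ===== SOURCE B (Python) =====
-- def subExprs(s):
--     ret = []
--     for i, c in enumerate(s):
--         if c == ')':
--             depth = 1
--             j = i - 1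
--             while j >= 0:
--                 if s[j] == ')':
--                     depth += 1
--                 elif s[j] == '(':
--                     depth -= 1
--                     if depth == 0:
--                         ret.append(s[j:i+1])
--                         break
--                 j -= 1
--     return ret
-- ===== Notes on version B (the rewrite author's own statement) =====
-- stated objective: alternative
-- what changed: Replaces the single-pass stack of open-paren indices by a stackless method: for each closing paren a local backward scan with a depth counter finds its matching opener.
import Mathlib
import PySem

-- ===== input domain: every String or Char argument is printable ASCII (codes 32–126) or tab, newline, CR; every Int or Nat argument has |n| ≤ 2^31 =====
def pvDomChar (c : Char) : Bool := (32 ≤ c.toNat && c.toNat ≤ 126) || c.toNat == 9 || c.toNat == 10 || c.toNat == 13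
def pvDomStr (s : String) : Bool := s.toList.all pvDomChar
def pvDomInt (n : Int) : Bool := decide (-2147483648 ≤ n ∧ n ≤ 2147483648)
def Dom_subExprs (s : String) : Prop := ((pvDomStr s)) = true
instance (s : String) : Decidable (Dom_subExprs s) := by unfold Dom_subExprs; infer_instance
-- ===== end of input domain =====

-- B replaces A's stack of open-paren indices by, per ')', a local backward scan with a
-- depth counter (alternative decomposition; return values proved equal on all inputs).

-- ===== PORT A =====
-- the for-loop over enumerate(s), carrying (ret, stack); `len(stack) < maxLength`
-- is always True (maxLength = math.inf), so the push is unconditional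
def subExprsGoA (s : String) : List (Int × Char) → List String → List Int → List String
  | [], ret, _ => ret
  | (i, c) :: rest, ret, stack =>
    if c = '(' then
      subExprsGoA s rest ret (stack ++ [i])
    else if c = ')' then
      match stack.getLast? with
      | some start =>
          subExprsGoA s rest (ret ++ [PySem.Str.slice s (some start) (some (i + 1))]) stack.dropLast
      | none => subExprsGoA s rest ret stack
    else subExprsGoA s rest ret stack

def subExprs (s : String) : List String :=
  subExprsGoA s (PySem.List.enumerate s.toList) [] []

-- ===== PORT B =====
-- the `while j >= 0` backward scan of Source B: j counts down, depth starts at 1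
def findOpen (cs : List Char) : Nat → Int → Option Int
  | 0, depth =>
      let c := cs.getD 0 ' '
      if c = ')' then none
      else if c = '(' then (if depth - 1 = 0 then some 0 else none)
      else none
  | j + 1, depth =>
      let c := cs.getD (j + 1) ' '
      if c = ')' then findOpen cs j (depth + 1)
      else if c = '(' then
        (if depth - 1 = 0 then some (j + 1 : Nat) else findOpen cs j (depth - 1))
      else findOpen cs j depth

def subExprsGoB (s : String) : List (Int × Char) → List String → List String
  | [], ret => ret
  | (i, c) :: rest, ret =>
    if c = ')' then
      match (if i ≤ 0 then none else findOpen s.toList (i - 1).toNat 1) with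
      | some j => subExprsGoB s rest (ret ++ [PySem.Str.slice s (some j) (some (i + 1))])
      | none => subExprsGoB s rest ret
    else subExprsGoB s rest ret

def subExprs_alt (s : String) : List String :=
  subExprsGoB s (PySem.List.enumerate s.toList) []

-- ===== PRECONDITION & SPEC =====
def Spec_subExprs (s : String) (out : List String) : Prop := out = subExprs_alt s
instance (s : String) (out : List String) : Decidable (Spec_subExprs s out) := by unfold Spec_subExprs; infer_instance

-- ===== CLAIM (what is proved, stated in full; the proofs are below) =====
def Claim_equal_subExprs : Prop := ∀ (s : String), Dom_subExprs s → Spec_subExprs s (subExprs s)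

-- ===== LEMMAS AND PROOFS =====

-- proof helper: the stack A holds after processing a prefix, computed functionally
def stkStep (st : List Int) (ic : Int × Char) : List Int :=
  if ic.2 = '(' then st ++ [ic.1] else if ic.2 = ')' then st.dropLast else st

def stkP (cs : List Char) : List Int :=
  (PySem.List.enumerate cs).foldl stkStep []

theorem stkP_nil : stkP [] = [] := rfl

theorem stkP_concat (l : List Char) (c : Char) :
    stkP (l ++ [c]) = stkStep (stkP l) ((l.length : Int), c) := by
  simp [stkP, PySem.List.enumerate_append, PySem.List.enumerate_cons,
    PySem.List.enumerate_nil]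

theorem revDropLast_getElem? {α : Type} (l : List α) (k : Nat) :
    l.dropLast.reverse[k]? = l.reverse[k + 1]? := by
  rw [← List.tail_reverse, List.getElem?_tail]

-- the backward scan from j at depth k+1 finds the element k from the top of the
-- stack of the prefix cs.take (j+1)
theorem findOpen_eq (cs : List Char) (j : Nat) (hj : j < cs.length) (k : Nat) :
    findOpen cs j ((k : Int) + 1) = (stkP (cs.take (j + 1))).reverse[k]? := by
  induction j generalizing k with
  | zero =>
    have h0 : cs.take 1 = [cs[0]] := by
      cases cs with
      | nil => simp at hj
      | cons a t => simp
    have hg : cs[0]?.getD ' ' = cs[0] := by simp [List.getElem?_eq_getElem hj]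
    rw [findOpen, h0]
    by_cases hc1 : cs[0] = ')'
    · simp [List.getD, hg, hc1, stkP, PySem.List.enumerate_cons, PySem.List.enumerate_nil, stkStep]
    · by_cases hc2 : cs[0] = '('
      · have hstep : stkP ['('] = [(0 : Int)] := by
          simp [stkP, PySem.List.enumerate_cons, PySem.List.enumerate_nil, stkStep]
        cases k with
        | zero => simp [List.getD, hg, hc1, hc2, hstep]
        | succ k' =>
          have hne : ¬ ((k' : Int) + 1 = 0) := by omega
          simp [List.getD, hg, hc1, hc2, hstep, hne]
      · simp [List.getD, hg, hc1, hc2, stkP, PySem.List.enumerate_cons,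
          PySem.List.enumerate_nil, stkStep]
  | succ j ih =>
    have hj' : j < cs.length := Nat.lt_of_succ_lt hj
    have htake : cs.take (j + 1 + 1) = cs.take (j + 1) ++ [cs[j + 1]] := by
      rw [List.take_succ, List.getElem?_eq_getElem hj]; rfl
    have hg : cs[j + 1]?.getD ' ' = cs[j + 1] := by simp [List.getElem?_eq_getElem hj]
    have hlen : ((cs.take (j + 1)).length : Int) = ((j + 1 : Nat) : Int) := by
      simp [List.length_take, Nat.min_eq_left (Nat.succ_le_of_lt hj')]
    rw [findOpen, htake, stkP_concat]
    by_cases hc1 : cs[j + 1] = ')'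
    · have hcast : (k : Int) + 1 + 1 = ((k + 1 : Nat) : Int) + 1 := by push_cast; ring
      rw [show (cs.getD (j + 1) ' ') = cs[j + 1] from hg, if_pos hc1, hcast, ih hj' (k + 1)]
      simp [stkStep, hc1, revDropLast_getElem?]
    · by_cases hc2 : cs[j + 1] = '('
      · rw [show (cs.getD (j + 1) ' ') = cs[j + 1] from hg, if_neg hc1, if_pos hc2]
        have hred : (k : Int) + 1 - 1 = (k : Int) := by ring
        rw [hred]
        cases k with
        | zero =>
          rw [if_pos (by norm_num)]
          simp [stkStep, hc2, hlen, hj']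
        | succ k' =>
          rw [if_neg (by push_cast; omega),
            show ((k' + 1 : Nat) : Int) = (k' : Int) + 1 from by push_cast; ring,
            ih hj' k']
          simp [stkStep, hc2, hj']
      · rw [show (cs.getD (j + 1) ' ') = cs[j + 1] from hg, if_neg hc1, if_neg hc2, ih hj' k]
        simp [stkStep, hc1, hc2]

-- joint loop invariant: over the common suffix, A (with its stack) and B produce the same list
theorem go_eq (s : String) (t : List Char) :
    ∀ (k : Nat) (ret : List String), s.toList = s.toList.take k ++ t →
    subExprsGoA s (PySem.List.enumerate t k) ret (stkP (s.toList.take k))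
      = subExprsGoB s (PySem.List.enumerate t k) ret := by
  induction t with
  | nil => intro k ret _; simp [PySem.List.enumerate_nil, subExprsGoA, subExprsGoB]
  | cons c t ih =>
    intro k ret hsplit
    have hk : k < s.toList.length := by
      by_contra h
      have h2 : s.toList.take k = s.toList := List.take_of_length_le (by omega)
      rw [h2] at hsplit
      have := congrArg List.length hsplit
      simp at this
    have hk2 : k ≤ s.length := by have := Nat.le_of_lt hk; simpa using this
    have hck : s.toList[k] = c := by
      have h := congrArg (fun l => l[k]?) hsplit
      simpa [List.getElem?_append_right, List.length_take, Nat.min_eq_left hk2,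
        List.getElem?_eq_getElem hk] using h
    have htake1 : s.toList.take (k + 1) = s.toList.take k ++ [c] := by
      rw [List.take_succ, List.getElem?_eq_getElem hk, hck]; rfl
    have hsplit' : s.toList = s.toList.take (k + 1) ++ t := by
      rw [htake1]; simpa using hsplit
    have hlen : ((s.toList.take k).length : Int) = (k : Int) := by
      simp [List.length_take, Nat.min_eq_left hk2]
    rw [PySem.List.enumerate_cons]
    by_cases hc1 : c = '('
    · have hstk : stkP (s.toList.take k) ++ [(k : Int)] = stkP (s.toList.take (k + 1)) := by
        rw [htake1, stkP_concat]; simp [stkStep, hc1, hlen, hk2]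
      rw [subExprsGoA, subExprsGoB, if_pos hc1, if_neg (by simp [hc1]), hstk]
      exact ih (k + 1) ret hsplit'
    · by_cases hc2 : c = ')'
      · have hstk' : (stkP (s.toList.take k)).dropLast = stkP (s.toList.take (k + 1)) := by
          rw [htake1, stkP_concat]; simp [stkStep, hc1, hc2]
        have hmatch : (if (k : Int) ≤ 0 then none else findOpen s.toList ((k : Int) - 1).toNat 1)
            = (stkP (s.toList.take k)).getLast? := by
          cases k with
          | zero => simp [stkP_nil]
          | succ k' =>
            have hle : ¬ ((k' + 1 : Nat) : Int) ≤ 0 := by push_cast; omega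
            have htn : (((k' + 1 : Nat) : Int) - 1).toNat = k' := by push_cast; omega
            rw [if_neg hle, htn, show (1 : Int) = ((0 : Nat) : Int) + 1 from by norm_num,
              findOpen_eq s.toList k' (by omega) 0, List.getLast?_eq_head?_reverse]
            cases (stkP (s.toList.take (k' + 1))).reverse <;> simp
        rw [subExprsGoA, subExprsGoB, if_neg hc1, if_pos hc2, if_pos hc2, hmatch]
        cases hlast : (stkP (s.toList.take k)).getLast? with
        | none =>
          have hnil : stkP (s.toList.take k) = [] := List.getLast?_eq_none_iff.mp hlast
          have heq : stkP (s.toList.take (k + 1)) = stkP (s.toList.take k) := by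
            rw [← hstk', hnil]; rfl
          have := ih (k + 1) ret hsplit'
          rw [heq] at this
          simpa using this
        | some j =>
          have := ih (k + 1) (ret ++ [PySem.Str.slice s (some j) (some ((k : Int) + 1))]) hsplit'
          rw [← hstk'] at this
          simpa using this
      · rw [subExprsGoA, subExprsGoB, if_neg hc1, if_neg hc2, if_neg hc2]
        have hstk : stkP (s.toList.take k) = stkP (s.toList.take (k + 1)) := by
          rw [htake1, stkP_concat]; simp [stkStep, hc1, hc2]
        rw [hstk]; exact ih (k + 1) ret hsplit'

-- ===== VERDICT (by name: the statement is the Claim_ definition above) =====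
theorem subExprs_spec : Claim_equal_subExprs := by
  intro s _
  unfold Spec_subExprs subExprs subExprs_alt
  have := go_eq s s.toList 0 [] (by simp)
  simpa [stkP_nil] using this
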